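-- pv_equiv track=rewrite | github.com/Cho-Hyeon-Sang/python | 2_ControlStatement/untitled.py | get_prime_cnt_sum
-- ===== SOURCE A (Python) =====
-- def get_prime_cnt_sum(number):
--     li = []
--     for n in range(2, number+1):
--         for x in range(2, n):
--             if n % x == 0:
--                 break
--         else:
--             li.append(n)
--     return f'찌찌 개수:{len(li)}, 찌찌 합:{sum(li)}'
-- ===== SOURCE B (Python) =====
-- def get_prime_cnt_sum(number):
--     # Sieve: mark every multiple m = 2p, 3p, ... of each p >= 2 as composite,
--     # then count/sum the unmarked numbers in [2, number].
--     composite = set()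
--     for p in range(2, number + 1):
--         for m in range(2 * p, number + 1, p):
--             composite.add(m)
--     cnt = 0
--     total = 0
--     for n in range(2, number + 1):
--         if n not in composite:
--             cnt += 1
--             total += n
--     return f'찌찌 개수:{cnt}, 찌찌 합:{total}'
-- ===== Notes on version B (the rewrite author's own statement) =====
-- stated objective: faster
-- what changed: replaces per-number trial division with a sieve that marks all proper multiples of each p>=2 in one pass, then counts/sums the unmarked numbers
import Mathlib
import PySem

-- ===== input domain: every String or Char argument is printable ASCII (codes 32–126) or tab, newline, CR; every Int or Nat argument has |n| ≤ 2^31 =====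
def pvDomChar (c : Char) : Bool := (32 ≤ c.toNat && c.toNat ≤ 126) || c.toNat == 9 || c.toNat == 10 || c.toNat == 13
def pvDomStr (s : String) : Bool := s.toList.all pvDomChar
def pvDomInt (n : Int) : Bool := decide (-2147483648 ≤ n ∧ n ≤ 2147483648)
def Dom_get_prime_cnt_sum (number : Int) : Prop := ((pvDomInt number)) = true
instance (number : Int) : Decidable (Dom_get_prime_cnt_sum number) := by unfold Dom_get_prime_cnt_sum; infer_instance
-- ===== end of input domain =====

-- B replaces A's per-number trial division by a sieve (mark all proper multiples of each p ≥ 2, then count/sum the unmarked numbers): asymptotically faster.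

-- ===== PORT A =====
-- inner 'for x in range(2, n): if n % x == 0: break': scans x = 2,3,… and stops at the first divisor
def pvTrial (n x : Int) : Bool :=
  if h : x < n then
    if PySem.Int.mod n x == 0 then true
    else pvTrial n (x + 1)
  else false
termination_by (n - x).toNat
decreasing_by omega

def get_prime_cnt_sum (number : Int) : String :=
  let li : List Int :=
    (PySem.List.pyRange 2 (number + 1) 1).foldl
      (fun li n =>
        -- the for/else: append n iff the inner loop found no divisor (did not break)
        if pvTrial n 2 then li
        else li ++ [n]) []
  "찌찌 개수:" ++ PySem.Int.toStr (li.length : Int) ++ ", 찌찌 합:" ++ PySem.Int.toStr li.sum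

-- ===== PORT B =====
def get_prime_cnt_sum_alt (number : Int) : String :=
  let composite : PySem.Set Int :=
    (PySem.List.pyRange 2 (number + 1) 1).foldl
      (fun s p => (PySem.List.pyRange (2 * p) (number + 1) p).foldl PySem.Set.add s)
      PySem.Set.empty
  let ct : Int × Int :=
    (PySem.List.pyRange 2 (number + 1) 1).foldl
      (fun acc n => if PySem.Set.contains composite n then acc else (acc.1 + 1, acc.2 + n))
      (0, 0)
  "찌찌 개수:" ++ PySem.Int.toStr ct.1 ++ ", 찌찌 합:" ++ PySem.Int.toStr ct.2

-- ===== PRECONDITION & SPEC =====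
def Spec_get_prime_cnt_sum (number : Int) (out : String) : Prop := out = get_prime_cnt_sum_alt number
instance (number : Int) (out : String) : Decidable (Spec_get_prime_cnt_sum number out) := by unfold Spec_get_prime_cnt_sum; infer_instance

-- ===== CLAIM (what is proved, stated in full; the proofs are below) =====
def Claim_equal_get_prime_cnt_sum : Prop := ∀ (number : Int), Dom_get_prime_cnt_sum number → Spec_get_prime_cnt_sum number (get_prime_cnt_sum number)

-- ===== LEMMAS AND PROOFS =====

-- membership in the sieve's nested marking loop
theorem pv_mem_sieve (l : List Int) (g : Int → List Int) (s : PySem.Set Int) (y : Int) :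
    y ∈ l.foldl (fun s p => (g p).foldl PySem.Set.add s) s ↔ y ∈ s ∨ ∃ p ∈ l, y ∈ g p := by
  induction l generalizing s with
  | nil => simp
  | cons p t ih =>
      rw [List.foldl_cons, ih,
        show ((g p).foldl PySem.Set.add s) = PySem.Set.update s (g p) from rfl,
        PySem.Set.mem_update]
      constructor
      · rintro (⟨h | h⟩ | ⟨q, hq, hy⟩)
        · exact Or.inl h
        · exact Or.inr ⟨p, by simp, h⟩
        · exact Or.inr ⟨q, by simp [hq], hy⟩
      · rintro (h | ⟨q, hq, hy⟩)
        · exact Or.inl (Or.inl h)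
        · rcases List.mem_cons.mp hq with rfl | hq
          · exact Or.inl (Or.inr hy)
          · exact Or.inr ⟨q, hq, hy⟩

-- trial division finds a divisor of n iff the sieve marks n (for 2 ≤ n ≤ number)
theorem pv_divisor_iff (number n : Int) (h2 : 2 ≤ n) (hn : n ≤ number) :
    (∃ x, (2 ≤ x ∧ x < n) ∧ x ∣ n) ↔
      ∃ p, (2 ≤ p ∧ p < number + 1) ∧ (2 * p ≤ n ∧ n < number + 1 ∧ p ∣ n - 2 * p) := by
  constructor
  · rintro ⟨x, ⟨hx2, hxn⟩, k, hk⟩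
    have hk2 : 2 ≤ k := by nlinarith
    refine ⟨x, ⟨hx2, by omega⟩, by nlinarith, by omega, ⟨k - 2, by rw [hk]; ring⟩⟩
  · rintro ⟨p, ⟨hp2, _⟩, h2p, _, k, hk⟩
    exact ⟨p, ⟨hp2, by omega⟩, ⟨k + 2, by rw [mul_add]; omega⟩⟩

-- what the inner for/break scan decides: a divisor of n exists in [x, n)
theorem pvTrial_iff (n x : Int) : pvTrial n x = true ↔
    ∃ y, (x ≤ y ∧ y < n) ∧ PySem.Int.mod n y = 0 := by
  suffices H : ∀ (k : Nat) (x : Int), (n - x).toNat ≤ k →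
      (pvTrial n x = true ↔ ∃ y, (x ≤ y ∧ y < n) ∧ PySem.Int.mod n y = 0) from
    H (n - x).toNat x le_rfl
  intro k
  induction k with
  | zero =>
      intro x hk
      rw [pvTrial]
      have hxn : ¬ x < n := by omega
      simp only [hxn, dite_false]
      constructor
      · intro h; exact absurd h (by simp)
      · rintro ⟨y, ⟨h1, h2⟩, _⟩; omega
  | succ k ih =>
      intro x hk
      rw [pvTrial]
      by_cases hxn : x < n
      · simp only [hxn, dite_true]
        by_cases hdvd : PySem.Int.mod n x == 0
        · rw [if_pos hdvd]
          exact ⟨fun _ => ⟨x, ⟨le_rfl, hxn⟩, by simpa using hdvd⟩, fun _ => rfl⟩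
        · rw [if_neg hdvd, ih (x + 1) (by omega)]
          constructor
          · rintro ⟨y, ⟨h1, h2⟩, h3⟩; exact ⟨y, ⟨by omega, h2⟩, h3⟩
          · rintro ⟨y, ⟨h1, h2⟩, h3⟩
            refine ⟨y, ⟨?_, h2⟩, h3⟩
            rcases eq_or_lt_of_le h1 with rfl | h
            · exact absurd h3 (by simpa using hdvd)
            · omega
      · simp only [hxn, dite_false]
        constructor
        · intro h; exact absurd h (by simp)
        · rintro ⟨y, ⟨h1, h2⟩, _⟩; omega

-- the trial-division test and the sieve-membership test agree, as Bools, on every n of the range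
theorem pv_test_eq (number n : Int) (hmem : n ∈ PySem.List.pyRange 2 (number + 1) 1) :
    pvTrial n 2 =
      PySem.Set.contains
        ((PySem.List.pyRange 2 (number + 1) 1).foldl
          (fun s p => (PySem.List.pyRange (2 * p) (number + 1) p).foldl PySem.Set.add s)
          PySem.Set.empty) n := by
  have hm := PySem.List.mem_pyRange_one.mp hmem
  have hL : (pvTrial n 2 = true) ↔ ∃ x, (2 ≤ x ∧ x < n) ∧ x ∣ n := by
    rw [pvTrial_iff]
    simp only [PySem.Int.mod_eq_zero_iff_dvd]
  have hR : (PySem.Set.contains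
        ((PySem.List.pyRange 2 (number + 1) 1).foldl
          (fun s p => (PySem.List.pyRange (2 * p) (number + 1) p).foldl PySem.Set.add s)
          PySem.Set.empty) n = true) ↔
      ∃ p, (2 ≤ p ∧ p < number + 1) ∧ (2 * p ≤ n ∧ n < number + 1 ∧ p ∣ n - 2 * p) := by
    rw [PySem.Set.contains_iff, pv_mem_sieve]
    constructor
    · rintro (h | ⟨p, hp, hy⟩)
      · exact absurd h (by simp [PySem.Set.empty])
      · rw [PySem.List.mem_pyRange_one] at hp
        rw [PySem.List.mem_pyRange_iff_of_pos (by omega)] at hy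
        exact ⟨p, hp, hy⟩
    · rintro ⟨p, hp, hy⟩
      refine Or.inr ⟨p, PySem.List.mem_pyRange_one.mpr hp, ?_⟩
      rw [PySem.List.mem_pyRange_iff_of_pos (by omega)]
      exact hy
  rw [Bool.eq_iff_iff, hL, hR]
  exact pv_divisor_iff number n hm.1 (by omega)

-- the two result loops agree whenever their tests agree on the traversed range
theorem pv_main (R : List Int) (q q' : Int → Bool) (hq : ∀ n ∈ R, q n = q' n) :
    "찌찌 개수:" ++
        PySem.Int.toStr (((R.foldl (fun li n => if q n then li else li ++ [n]) []).length : Int)) ++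
        ", 찌찌 합:" ++ PySem.Int.toStr (R.foldl (fun li n => if q n then li else li ++ [n]) []).sum =
      "찌찌 개수:" ++
        PySem.Int.toStr ((R.foldl (fun acc n => if q' n then acc else (acc.1 + 1, acc.2 + n))
          ((0 : Int), (0 : Int))).1) ++
        ", 찌찌 합:" ++ PySem.Int.toStr ((R.foldl (fun acc n => if q' n then acc else (acc.1 + 1, acc.2 + n))
          ((0 : Int), (0 : Int))).2) := by
  have h0 : R.foldl (fun li n => if q n then li else li ++ [n]) [] =
      R.foldl (fun li n => if (! q' n) then li ++ [n] else li) [] :=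
    PySem.List.foldl_congr_mem R _ _ []
      (by intro acc n hn
          rw [hq n hn]
          rcases Bool.eq_false_or_eq_true (q' n) with h | h <;> simp [h])
  have hli : R.foldl (fun li n => if q n then li else li ++ [n]) [] =
      R.filter (fun n => ! q' n) := by
    rw [h0]
    exact (PySem.List.foldl_append_if_eq_filter (fun n => ! q' n) R []).trans (List.nil_append _)
  have h1 : R.foldl (fun acc n => if q' n then acc else (acc.1 + 1, acc.2 + n))
      ((0 : Int), (0 : Int)) =
      R.foldl (fun acc n => (if (! q' n) then acc.1 + 1 else acc.1,
                             if (! q' n) then acc.2 + n else acc.2)) ((0 : Int), (0 : Int)) :=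
    PySem.List.foldl_congr_mem R _ _ ((0 : Int), (0 : Int))
      (by intro acc n _
          rcases Bool.eq_false_or_eq_true (q' n) with h | h <;> simp [h])
  have h2 : R.foldl (fun acc n => (if (! q' n) then acc.1 + 1 else acc.1,
                                   if (! q' n) then acc.2 + n else acc.2)) ((0 : Int), (0 : Int)) =
      (R.foldl (fun c n => if (! q' n) then c + 1 else c) (0 : Int),
       R.foldl (fun t n => if (! q' n) then t + n else t) (0 : Int)) :=
    PySem.List.foldl_prod_mk (fun c n => if (! q' n) then c + 1 else c)
      (fun t n => if (! q' n) then t + n else t) R 0 0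
  have h3 : R.foldl (fun c n => if (! q' n) then c + 1 else c) (0 : Int) =
      (R.countP (fun n => ! q' n) : Int) := by
    simpa using PySem.List.foldl_if_add_one (fun n => ! q' n) R 0
  have h4 : R.foldl (fun t n => if (! q' n) then t + n else t) (0 : Int) =
      (R.filter (fun n => ! q' n)).sum := by
    have h5 : R.foldl (fun t n => if (! q' n) then t + n else t) (0 : Int) =
        (R.filter (fun n => ! q' n)).foldl (fun t n => t + n) (0 : Int) :=
      PySem.List.foldl_if_eq_foldl_filter (fun n => ! q' n) (fun t n => t + n) R 0
    rw [h5]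
    simpa using PySem.List.foldl_add (R.filter (fun n => ! q' n)) (fun x => x) 0
  rw [hli, h1, h2, h3, h4, List.countP_eq_length_filter]

-- ===== VERDICT (by name: the statement is the Claim_ definition above) =====
theorem get_prime_cnt_sum_spec : Claim_equal_get_prime_cnt_sum := by
  intro number _
  unfold Spec_get_prime_cnt_sum get_prime_cnt_sum get_prime_cnt_sum_alt
  exact pv_main (PySem.List.pyRange 2 (number + 1) 1)
    (fun n => pvTrial n 2)
    (fun n => PySem.Set.contains
      ((PySem.List.pyRange 2 (number + 1) 1).foldl
        (fun s p => (PySem.List.pyRange (2 * p) (number + 1) p).foldl PySem.Set.add s)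
        PySem.Set.empty) n)
    (fun n hn => pv_test_eq number n hn)
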